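-- pv_equiv track=rewrite | github.com/DmitriyBurtsev785/deco_uther_lightbringer | deco_uther_lightbringer/main.py | multiply_string_by_number
-- ===== SOURCE A (Python) =====
-- def multiply_string_by_number(line: str, number: int) -> str:
--     current_line = ''
--     for i in range(number):
--         if i % 2 == 1:
--             current_line += line.upper()
--         else:
--             current_line += line
--     return current_line
-- ===== SOURCE B (Python) =====
-- def multiply_string_by_number(line: str, number: int) -> str:
--     n = number if number > 0 else 0
--     pair = line + line.upper()
--     return pair * (n // 2) + (line if n % 2 else '')
-- ===== Notes on version B (the rewrite author's own statement) =====
-- stated objective: simpler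
-- what changed: Replaces the indexed loop with its per-iteration parity branch by building the two-repetition block line+line.upper() once and repeating it with string multiplication, appending one trailing line when the count is odd.
import Mathlib
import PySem

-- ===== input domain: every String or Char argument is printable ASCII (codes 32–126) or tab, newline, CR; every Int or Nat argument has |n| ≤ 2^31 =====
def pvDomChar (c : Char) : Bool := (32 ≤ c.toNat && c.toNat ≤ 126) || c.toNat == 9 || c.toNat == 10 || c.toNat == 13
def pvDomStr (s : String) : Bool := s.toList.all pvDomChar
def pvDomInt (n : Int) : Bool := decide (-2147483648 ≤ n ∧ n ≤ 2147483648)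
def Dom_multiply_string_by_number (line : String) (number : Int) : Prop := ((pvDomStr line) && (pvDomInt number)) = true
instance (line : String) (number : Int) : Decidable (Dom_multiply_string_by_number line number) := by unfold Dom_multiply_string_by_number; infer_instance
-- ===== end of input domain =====

-- B replaces A's indexed loop with one (line + line.upper()) block repeated number // 2 times
-- plus a single trailing line when number is odd (objective: simpler).

-- ===== PORT A =====
def multiply_string_by_number (line : String) (number : Int) : String :=
  (PySem.List.pyRange 0 number 1).foldl
    (fun cur i => if PySem.Int.mod i 2 = 1 then cur ++ PySem.Str.upper line else cur ++ line) ""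

-- ===== PORT B =====
-- Python's `pair * k` (string repetition) is ported as joining k copies of pair.
def multiply_string_by_number_alt (line : String) (number : Int) : String :=
  let n : Int := if number > 0 then number else 0
  let pair : String := line ++ PySem.Str.upper line
  PySem.Str.join "" (List.replicate (PySem.Int.floordiv n 2).toNat pair)
    ++ (if PySem.Int.mod n 2 ≠ 0 then line else "")

-- ===== PRECONDITION & SPEC =====
def Spec_multiply_string_by_number (line : String) (number : Int) (out : String) : Prop := out = multiply_string_by_number_alt line number
instance (line : String) (number : Int) (out : String) : Decidable (Spec_multiply_string_by_number line number out) := by unfold Spec_multiply_string_by_number; infer_instance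

-- ===== CLAIM (what is proved, stated in full; the proofs are below) =====
def Claim_equal_multiply_string_by_number : Prop := ∀ (line : String) (number : Int), Dom_multiply_string_by_number line number → Spec_multiply_string_by_number line number (multiply_string_by_number line number)

-- ===== LEMMAS AND PROOFS =====

-- ''.join with empty separator is flatten.
lemma pv_join_nil (l : List (List Char)) : PySem.Chars.join [] l = l.flatten := by
  induction l with
  | nil => rfl
  | cons a t ih =>
    cases t with
    | nil => simp [PySem.Chars.join_singleton]
    | cons b u => rw [PySem.Chars.join_cons_cons]; simp_all

-- Common closed form both ports reach for a nonnegative count m.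
lemma pv_A_nat (line : String) (m : Nat) :
    (multiply_string_by_number line (m : Int)).toList =
      (List.replicate (m / 2) (line.toList ++ (PySem.Str.upper line).toList)).flatten
        ++ (if m % 2 = 1 then line.toList else []) := by
  induction m with
  | zero => simp [multiply_string_by_number]
  | succ k ih =>
    have hstep : PySem.List.pyRange 0 ((k:Int)+1) 1
        = PySem.List.pyRange 0 (k:Int) 1 ++ [(k:Int)] :=
      PySem.List.pyRange_one_succ_right (by positivity)
    have hc : ((k+1 : Nat) : Int) = (k : Int) + 1 := by push_cast; ring
    rw [multiply_string_by_number] at ih ⊢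
    rw [hc, hstep, List.foldl_append]
    simp only [List.foldl_cons, List.foldl_nil]
    have hm : PySem.Int.mod (k : Int) 2 = ((k % 2 : Nat) : Int) := by
      exact_mod_cast PySem.Int.mod_natCast k 2
    rcases Nat.mod_two_eq_zero_or_one k with he | he
    · have hif : ¬ PySem.Int.mod (k:Int) 2 = 1 := by rw [hm, he]; decide
      have h1 : (k+1) / 2 = k / 2 := by omega
      have h2 : (k+1) % 2 = 1 := by omega
      rw [if_neg hif]
      simp only [String.toList_append, ih, he, h1, h2]
      simp
    · have hif : PySem.Int.mod (k:Int) 2 = 1 := by rw [hm, he]; decide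
      have h1 : (k+1) / 2 = k / 2 + 1 := by omega
      have h2 : (k+1) % 2 = 0 := by omega
      rw [if_pos hif]
      simp only [String.toList_append, ih, he, h1, h2, List.replicate_succ']
      simp

lemma pv_B_nat (line : String) (m : Nat) :
    (multiply_string_by_number_alt line (m : Int)).toList =
      (List.replicate (m / 2) (line.toList ++ (PySem.Str.upper line).toList)).flatten
        ++ (if m % 2 = 1 then line.toList else []) := by
  simp only [multiply_string_by_number_alt]
  rcases Nat.eq_zero_or_pos m with h | h
  · subst h; simp
  · have hpos : (0 : Int) < (m : Int) := by exact_mod_cast h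
    rw [if_pos hpos]
    have h1 : PySem.Int.floordiv (m : Int) 2 = ((m / 2 : Nat) : Int) := by
      exact_mod_cast PySem.Int.floordiv_natCast m 2
    have h2 : PySem.Int.mod (m : Int) 2 = ((m % 2 : Nat) : Int) := by
      exact_mod_cast PySem.Int.mod_natCast m 2
    simp only [h1, h2, Int.toNat_natCast]
    rcases Nat.mod_two_eq_zero_or_one m with he | he
    · rw [he]
      simp [pv_join_nil]
    · rw [he]
      simp [pv_join_nil]

-- ===== VERDICT (by name: the statement is the Claim_ definition above) =====
theorem multiply_string_by_number_spec : Claim_equal_multiply_string_by_number := by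
  intro line number _
  unfold Spec_multiply_string_by_number
  apply String.toList_injective ?_
  rcases le_or_gt number 0 with h | h
  · rw [multiply_string_by_number, PySem.List.pyRange_one_eq_nil h]
    simp only [multiply_string_by_number_alt, if_neg (not_lt.mpr h)]
    simp
  · have hm : number = ((number.toNat : Nat) : Int) := by omega
    rw [hm, pv_A_nat, pv_B_nat]
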